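-- pv_equiv track=rewrite | github.com/k3v1n-KI/Automated-Research-System | task_dispatcher.py | bind_template
-- ===== SOURCE A (Python) =====
-- from typing import Any, Dict, List, Optional, Iterable
--
-- def bind_template(template: str, slots: Dict[str, List[str]], cap: int = 100) -> List[str]:
--     if not slots:
--         return [template]
--     keys = list(slots.keys())
--     vals = [slots[k] for k in keys]
--     out = []
--     def _recur(i: int, curr: str):
--         if len(out) >= cap:
--             return
--         if i == len(keys):
--             out.append(curr)
--             return
--         k = keys[i]
--         for v in vals[i]:
--             _recur(i+1, curr.replace(f"{{{k}}}", str(v)))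
--     _recur(0, template)
--     return out[:cap]
-- ===== SOURCE B (Python) =====
-- def bind_template(template, slots, cap=100):
--     if not slots:
--         return [template]
--     keys = list(slots.keys())
--     vals = [slots[k] for k in keys]
--     if cap <= 0 or any(not vs for vs in vals):
--         return []
--     p = 1
--     for vs in vals:
--         p *= len(vs)
--     outs = [template]
--     for k, vs in zip(keys, vals):
--         p //= len(vs)
--         # only the first ceil(cap/p) partial fills can contribute to the first cap results
--         need = (cap + p - 1) // p
--         nxt = []
--         for s in outs:
--             if len(nxt) >= need:
--                 break
--             for v in vs:
--                 if len(nxt) >= need: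
--                     break
--                 nxt.append(s.replace("{" + k + "}", v))
--         outs = nxt
--     return outs
-- ===== Notes on version B (the rewrite author's own statement) =====
-- stated objective: faster
-- what changed: Replaces A's capped depth-first recursion over slot indices with an iterative level-by-level expansion that keeps, per slot, only the first ceil(cap/suffix-product) partial fills that can still contribute to the first cap results.
import Mathlib
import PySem

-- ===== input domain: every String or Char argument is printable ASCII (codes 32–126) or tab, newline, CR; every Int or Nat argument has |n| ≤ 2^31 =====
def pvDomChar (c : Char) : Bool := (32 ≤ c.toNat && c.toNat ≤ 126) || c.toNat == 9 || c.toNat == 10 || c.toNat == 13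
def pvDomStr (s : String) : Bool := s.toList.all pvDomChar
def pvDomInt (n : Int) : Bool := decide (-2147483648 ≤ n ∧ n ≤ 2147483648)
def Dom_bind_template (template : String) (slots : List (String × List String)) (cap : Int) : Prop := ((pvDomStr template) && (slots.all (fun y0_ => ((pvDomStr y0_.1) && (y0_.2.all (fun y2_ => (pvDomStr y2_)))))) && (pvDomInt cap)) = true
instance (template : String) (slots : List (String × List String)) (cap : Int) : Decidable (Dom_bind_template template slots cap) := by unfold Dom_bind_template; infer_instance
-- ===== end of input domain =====

-- B replaces A's capped depth-first recursion by an iterative level-by-level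
-- expansion over the slots, keeping per level only the partial fills that can
-- still contribute to the first cap results (alternative decomposition; return
-- values proved equal on all inputs).

-- ===== PORT A =====

-- curr.replace("{"+k+"}", v)
def pvRepl (s k v : String) : String := PySem.Str.replace s ("{" ++ k ++ "}") v

-- A's inner _recur(i, curr), transcribed with the remaining keys/vals lists in
-- place of the index i (Python's i only ever walks these lists in lockstep).
def pvRecurA (cap : Int) (ks : List String) (vs : List (List String)) (curr : String) (out : List String) : List String :=
  if (out.length : Int) ≥ cap then out
  else
    match ks, vs with
    | [], _ => out ++ [curr]
    | k :: ks', v :: vs' =>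
        v.foldl (fun acc x => pvRecurA cap ks' vs' (pvRepl curr k x) acc) out
    | _ :: _, [] => out
termination_by ks.length

def bind_template (template : String) (slots : List (String × List String)) (cap : Int) : List String :=
  if slots = [] then [template]
  else
    let d := PySem.Dict.ofList slots
    let keys := PySem.Dict.keys d
    let vals := keys.map (fun k => PySem.Dict.getD d k [])
    let out := pvRecurA cap keys vals template []
    PySem.List.slice out none (some cap)

-- ===== PORT B =====

-- B's inner double loop for one level: append s.replace(...) while len(nxt) < need
def pvLevelB (need : Int) (k : String) (vs : List String) (outs : List String) : List String :=
  outs.foldl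
    (fun nxt s =>
      if (nxt.length : Int) ≥ need then nxt
      else vs.foldl
        (fun nxt2 v => if (nxt2.length : Int) ≥ need then nxt2 else nxt2 ++ [pvRepl s k v])
        nxt)
    []

-- one iteration of B's main loop: p //= len(vs); need = (cap + p - 1) // p; expand one slot
def pvStepB (cap : Int) (st : List String × Int) (kv : String × List String) : List String × Int :=
  let p := PySem.Int.floordiv st.2 (kv.2.length : Int)
  let need := PySem.Int.floordiv (cap + p - 1) p
  (pvLevelB need kv.1 kv.2 st.1, p)

def bind_template_alt (template : String) (slots : List (String × List String)) (cap : Int) : List String :=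
  if slots = [] then [template]
  else
    let d := PySem.Dict.ofList slots
    let keys := PySem.Dict.keys d
    let vals := keys.map (fun k => PySem.Dict.getD d k [])
    if cap ≤ 0 || vals.any (fun vs => vs.isEmpty) then []
    else
      let p0 := vals.foldl (fun p vs => p * (vs.length : Int)) 1
      ((keys.zip vals).foldl (pvStepB cap) ([template], p0)).1

-- ===== PRECONDITION & SPEC =====
def Spec_bind_template (template : String) (slots : List (String × List String)) (cap : Int) (out : List String) : Prop := out = bind_template_alt template slots cap
instance (template : String) (slots : List (String × List String)) (cap : Int) (out : List String) : Decidable (Spec_bind_template template slots cap out) := by unfold Spec_bind_template; infer_instance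

-- ===== CLAIM (what is proved, stated in full; the proofs are below) =====
def Claim_equal_bind_template : Prop := ∀ (template : String) (slots : List (String × List String)) (cap : Int), Dom_bind_template template slots cap → Spec_bind_template template slots cap (bind_template template slots cap)

-- ===== LEMMAS AND PROOFS =====

-- the full (uncapped) list of fills, in A's/B's shared enumeration order
def pvExpand : List (String × List String) → String → List String
  | [], s => [s]
  | (k, vs) :: ps, s => vs.flatMap (fun v => pvExpand ps (pvRepl s k v))

-- product of the value-list lengths
def pvProdLen : List (List String) → Nat
  | [] => 1
  | v :: vs => v.length * pvProdLen vs

-- ceiling division on Nat, (a + b - 1) / b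
def pvCdiv (a b : Nat) : Nat := (a + b - 1) / b

theorem pvExpand_nil_of_empty (ps : List (String × List String)) (s : String)
    (h : ∃ p ∈ ps, p.2 = []) : pvExpand ps s = [] := by
  induction ps generalizing s with
  | nil => rcases h with ⟨p, hp, _⟩; cases hp
  | cons p ps ih =>
    obtain ⟨k, vs⟩ := p
    rcases h with ⟨q, hq, hq2⟩
    rcases List.mem_cons.mp hq with rfl | hq'
    · simp at hq2; subst hq2; simp [pvExpand]
    · simp only [pvExpand]
      have : ∀ v, pvExpand ps (pvRepl s k v) = [] := fun v => ih _ ⟨q, hq', hq2⟩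
      simp [this]

theorem pvProdLen_pos (vs : List (List String)) (h : ∀ v ∈ vs, v ≠ []) :
    0 < pvProdLen vs := by
  induction vs with
  | nil => simp [pvProdLen]
  | cons v vs ih =>
    have hv : v ≠ [] := h v (by simp)
    have h1 : 0 < v.length := List.length_pos_iff.mpr hv
    have h2 : 0 < pvProdLen vs := ih (fun w hw => h w (by simp [hw]))
    exact Nat.mul_pos h1 h2

theorem pv_cdiv_one (a : Nat) : pvCdiv a 1 = a := by unfold pvCdiv; omega

theorem pv_cdiv_pos (a b : Nat) (ha : 0 < a) (hb : 0 < b) : 0 < pvCdiv a b := by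
  unfold pvCdiv
  exact (Nat.one_le_div_iff hb).mpr (by omega)

theorem pv_cdiv_le_mul (a s P : Nat) (ha : 0 < a) (hP : 0 < P) (hs : 0 < s) :
    pvCdiv a P ≤ pvCdiv a (s * P) * s := by
  have hsP : 0 < s * P := Nat.mul_pos hs hP
  unfold pvCdiv
  set q := (a + s * P - 1) / (s * P) with hqdef
  have h1 : a + s * P - 1 < q * (s * P) + s * P := Nat.lt_div_mul_add hsP
  have hq : a ≤ q * (s * P) := by omega
  have hq' : a ≤ q * s * P := by
    have hassoc : q * (s * P) = q * s * P := by ring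
    omega
  rw [Nat.div_le_iff_le_mul_add_pred hP]
  have hcomm : P * (q * s) = q * s * P := by ring
  omega

theorem pv_foldl_take (c : Nat) (g : String → List String) :
    ∀ (v : List String) (out : List String),
      v.foldl (fun acc x => acc ++ (g x).take (c - acc.length)) out
        = out ++ (v.flatMap g).take (c - out.length) := by
  intro v
  induction v with
  | nil => intro out; simp
  | cons x v ih =>
    intro out
    simp only [List.foldl_cons, List.flatMap_cons]
    rw [ih]
    rw [List.take_append, List.append_assoc]
    congr 2
    · congr 1
      simp [List.length_take]
      omega

theorem pvLevelB_eq (need : Int) (k : String) (vs : List String) (outs : List String) :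
    pvLevelB need k vs outs
      = (outs.flatMap (fun s => vs.map (fun v => pvRepl s k v))).take need.toNat := by
  have hinner : ∀ (s : String) (nxt : List String),
      vs.foldl (fun nxt2 v => if (nxt2.length : Int) ≥ need then nxt2 else nxt2 ++ [pvRepl s k v]) nxt
        = nxt ++ (vs.map (fun v => pvRepl s k v)).take (need.toNat - nxt.length) := by
    intro s nxt
    have hfun : (fun (nxt2 : List String) (v : String) =>
          if (nxt2.length : Int) ≥ need then nxt2 else nxt2 ++ [pvRepl s k v])
        = fun nxt2 v => nxt2 ++ ([pvRepl s k v]).take (need.toNat - nxt2.length) := by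
      funext nxt2 v
      by_cases h : (nxt2.length : Int) ≥ need
      · have h0 : need.toNat - nxt2.length = 0 := by omega
        simp [h, h0]
      · have h1 : 1 ≤ need.toNat - nxt2.length := by omega
        rw [if_neg h, List.take_of_length_le (by simpa using h1)]
    rw [hfun, pv_foldl_take need.toNat (fun v => [pvRepl s k v]) vs nxt]
    congr 1
    rw [← List.map_eq_flatMap]
  unfold pvLevelB
  have hfun2 : (fun (nxt : List String) (s : String) =>
        if (nxt.length : Int) ≥ need then nxt
        else vs.foldl
          (fun nxt2 v => if (nxt2.length : Int) ≥ need then nxt2 else nxt2 ++ [pvRepl s k v]) nxt)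
      = fun nxt s => nxt ++ (vs.map (fun v => pvRepl s k v)).take (need.toNat - nxt.length) := by
    funext nxt s
    by_cases h : (nxt.length : Int) ≥ need
    · have h0 : need.toNat - nxt.length = 0 := by omega
      simp [h, h0]
    · rw [if_neg h, hinner s nxt]
  rw [hfun2, pv_foldl_take need.toNat (fun s => vs.map (fun v => pvRepl s k v)) outs []]
  simp

theorem pvRecurA_eq (cap : Int) :
    ∀ (vs : List (List String)) (ks : List String), ks.length = vs.length →
    ∀ (curr : String) (out : List String),
      pvRecurA cap ks vs curr out
        = out ++ (pvExpand (ks.zip vs) curr).take (cap.toNat - out.length) := by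
  intro vs
  induction vs with
  | nil =>
    intro ks hlen curr out
    have hks : ks = [] := List.length_eq_zero_iff.mp (by simpa using hlen)
    subst hks
    rw [pvRecurA]
    by_cases h : (out.length : Int) ≥ cap
    · have hle : cap ≤ (out.length : Int) := h
      have h0 : cap.toNat - out.length = 0 := by omega
      simp [h, h0, pvExpand]
    · have hlt : (out.length : Int) < cap := lt_of_not_ge h
      have h1 : 1 ≤ cap.toNat - out.length := by omega
      rw [if_neg h]
      simp only [List.zip_nil_left, pvExpand]
      rw [List.take_of_length_le (by simpa using h1)]
  | cons v vs ih =>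
    intro ks hlen curr out
    obtain ⟨k, ks', rfl⟩ : ∃ k ks', ks = k :: ks' := by
      cases ks with
      | nil => simp at hlen
      | cons a b => exact ⟨a, b, rfl⟩
    rw [pvRecurA]
    by_cases h : (out.length : Int) ≥ cap
    · have : cap.toNat - out.length = 0 := by omega
      simp [h, this]
    · have hfun : (fun (acc : List String) (x : String) => pvRecurA cap ks' vs (pvRepl curr k x) acc)
          = fun acc x => acc ++ (pvExpand (ks'.zip vs) (pvRepl curr k x)).take (cap.toNat - acc.length) := by
        funext acc x
        exact ih ks' (by simpa using hlen) (pvRepl curr k x) acc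
      simp only [h, if_false, hfun]
      rw [pv_foldl_take (cap.toNat) (fun x => pvExpand (ks'.zip vs) (pvRepl curr k x)) v out]
      simp [pvExpand, List.zip_cons_cons]

theorem pv_take_flatMap_take (L : Nat) (g : String → List String)
    (hg : ∀ x, L ≤ (g x).length) :
    ∀ (X : List String) (c m : Nat), m ≤ c * L →
      ((X.take c).flatMap g).take m = (X.flatMap g).take m := by
  intro X
  induction X with
  | nil => intro c m _; simp
  | cons x X ih =>
    intro c m hm
    cases c with
    | zero =>
      have : m = 0 := by omega
      simp [this]
    | succ c' =>
      simp only [List.take_succ_cons, List.flatMap_cons]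
      rw [List.take_append, List.take_append]
      congr 1
      apply ih
      have hgx := hg x
      have hm' : m ≤ c' * L + L := by
        have : (c' + 1) * L = c' * L + L := by ring
        omega
      omega

theorem pv_foldl_prod (l : List (List String)) :
    ∀ (a : Int), l.foldl (fun p vs => p * (vs.length : Int)) a = a * (pvProdLen l : Int) := by
  induction l with
  | nil => intro a; simp [pvProdLen]
  | cons v l ih =>
    intro a
    simp only [List.foldl_cons, pvProdLen]
    rw [ih]
    push_cast
    ring

theorem pvLevelsB_eq (cap : Int) (hcap : 0 < cap) :
    ∀ (vs : List (List String)) (ks : List String), ks.length = vs.length →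
      (∀ v ∈ vs, v ≠ []) → ∀ (X : List String),
      ((ks.zip vs).foldl (pvStepB cap)
          (X.take (pvCdiv cap.toNat (pvProdLen vs)), (pvProdLen vs : Int))).1
        = (X.flatMap (pvExpand (ks.zip vs))).take cap.toNat := by
  intro vs
  induction vs with
  | nil =>
    intro ks hlen _ X
    have hks : ks = [] := List.length_eq_zero_iff.mp (by simpa using hlen)
    subst hks
    simp only [List.zip_nil_left, List.foldl_nil, pvProdLen, pv_cdiv_one, pvExpand]
    rw [← List.map_eq_flatMap]
    simp
  | cons v vs ih =>
    intro ks hlen hne X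
    obtain ⟨k, ks', rfl⟩ : ∃ k ks', ks = k :: ks' := by
      cases ks with
      | nil => simp at hlen
      | cons a b => exact ⟨a, b, rfl⟩
    have hs : 0 < v.length := List.length_pos_iff.mpr (hne v (by simp))
    have hP : 0 < pvProdLen vs := pvProdLen_pos vs (fun w hw => hne w (by simp [hw]))
    have hcapN : 0 < cap.toNat := by omega
    simp only [List.zip_cons_cons, List.foldl_cons]
    -- the step: p becomes pvProdLen vs, need becomes pvCdiv cap.toNat (pvProdLen vs)
    have hp : PySem.Int.floordiv ((pvProdLen (v :: vs) : Nat) : Int) ((v.length : Nat) : Int)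
        = ((pvProdLen vs : Nat) : Int) := by
      rw [PySem.Int.floordiv_natCast]
      simp only [pvProdLen]
      rw [Nat.mul_div_cancel_left _ hs]
    have hneed : PySem.Int.floordiv (cap + ((pvProdLen vs : Nat) : Int) - 1) ((pvProdLen vs : Nat) : Int)
        = ((pvCdiv cap.toNat (pvProdLen vs) : Nat) : Int) := by
      have hre : cap + ((pvProdLen vs : Nat) : Int) - 1
          = ((cap.toNat + pvProdLen vs - 1 : Nat) : Int) := by omega
      rw [hre, PySem.Int.floordiv_natCast]
      rfl
    have hstep : pvStepB cap (X.take (pvCdiv cap.toNat (pvProdLen (v :: vs))), ((pvProdLen (v :: vs) : Nat) : Int)) (k, v)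
        = ((X.flatMap (fun s => v.map (fun x => pvRepl s k x))).take (pvCdiv cap.toNat (pvProdLen vs)),
           ((pvProdLen vs : Nat) : Int)) := by
      unfold pvStepB
      simp only [hp, hneed]
      rw [pvLevelB_eq]
      rw [Int.toNat_natCast]
      rw [pv_take_flatMap_take v.length (fun s => v.map (fun x => pvRepl s k x)) (fun s => by simp) X _ _ ?_]
      · have := pv_cdiv_le_mul cap.toNat v.length (pvProdLen vs) hcapN hP hs
        simpa [pvProdLen] using this
    rw [hstep, ih ks' (by simpa using hlen) (fun w hw => hne w (by simp [hw]))
          (X.flatMap (fun s => v.map (fun x => pvRepl s k x)))]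
    congr 1
    rw [List.flatMap_assoc]
    congr 1
    funext s
    simp [pvExpand, List.flatMap_map]

-- ===== VERDICT (by name: the statement is the Claim_ definition above) =====
theorem bind_template_spec : Claim_equal_bind_template := by
  intro template slots cap _
  unfold Spec_bind_template bind_template bind_template_alt
  by_cases hs : slots = []
  · simp [hs]
  · simp only [hs, if_false]
    set d := PySem.Dict.ofList slots with hd
    set keys := PySem.Dict.keys d with hk
    set vals := keys.map (fun k => PySem.Dict.getD d k []) with hv
    have hlen : keys.length = vals.length := by simp [hv]
    have hrec := pvRecurA_eq cap vals keys hlen template []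
    by_cases hc : cap ≤ 0
    · -- cap ≤ 0: B returns []; A's recursion stops immediately, slice of [] is []
      have h0 : pvRecurA cap keys vals template [] = [] := by
        rw [pvRecurA.eq_def]; simp; omega
      simp [hc, h0, PySem.List.slice]
    · by_cases hemp : vals.any (fun vs => vs.isEmpty)
      · -- some value list empty: the full expansion is empty on both sides
        obtain ⟨vs0, hvs0mem, hvs0⟩ := List.any_eq_true.mp hemp
        have hx : ∃ p ∈ keys.zip vals, p.2 = [] := by
          obtain ⟨i, hi, hget⟩ := List.mem_iff_getElem.mp hvs0mem
          refine ⟨(keys[i]'(by omega), vals[i]'hi), ?_, ?_⟩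
          · rw [List.mem_iff_getElem]
            exact ⟨i, by simp [List.length_zip]; omega, by simp [List.getElem_zip]⟩
          · simpa [hget] using List.isEmpty_iff.mp hvs0
        have hexp : pvExpand (keys.zip vals) template = [] := pvExpand_nil_of_empty _ _ hx
        simp only [hc, decide_false, Bool.false_or, hemp, if_true]
        rw [hrec, hexp]
        simp [PySem.List.slice]
      · -- main case: cap > 0 and every value list nonempty
        have hcap : 0 < cap := by omega
        have hvne : ∀ v ∈ vals, v ≠ [] := by
          intro v hvmem hve
          exact hemp (List.any_eq_true.mpr ⟨v, hvmem, by simp [hve]⟩)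
        have hP : 0 < pvProdLen vals := pvProdLen_pos vals hvne
        have hp0 : vals.foldl (fun p vs => p * (vs.length : Int)) 1
            = ((pvProdLen vals : Nat) : Int) := by
          rw [pv_foldl_prod]; ring
        have hinit : ([template] : List String)
            = ([template] : List String).take (pvCdiv cap.toNat (pvProdLen vals)) := by
          have h1 : 0 < pvCdiv cap.toNat (pvProdLen vals) :=
            pv_cdiv_pos cap.toNat (pvProdLen vals) (by omega) hP
          rw [List.take_of_length_le (by simpa using h1)]
        simp only [hc, decide_false, Bool.false_or, hemp]
        rw [hp0, hinit, pvLevelsB_eq cap hcap vals keys hlen hvne [template]]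
        rw [hrec]
        rw [PySem.List.slice_to _ (le_of_lt hcap)]
        simp [List.take_take]
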